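-- pv_equiv track=rewrite | github.com/Arya004pro/insta_scraper | app/api/main.py | _pick_summary_row_for_run
-- ===== SOURCE A (Python) =====
-- def _pick_summary_row_for_run(
--     rows: list[dict[str, str]], run_id: str, normalized_profile_url: str | None
-- ) -> dict[str, str] | None:
--     if not rows:
--         return None
--
--     normalized = (normalized_profile_url or "").strip().lower().rstrip("/")
--     for row in reversed(rows):
--         if (row.get("Run ID") or "").strip() != run_id:
--             continue
--         row_profile = (
--             (row.get("Normalized Profile URL") or "").strip().lower().rstrip("/")
--         )
--         if normalized and row_profile and normalized == row_profile:
--             return row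
--
--     for row in reversed(rows):
--         if (row.get("Run ID") or "").strip() == run_id:
--             return row
--
--     return rows[-1]
-- ===== SOURCE B (Python) =====
-- def _pick_summary_row_for_run(rows, run_id, normalized_profile_url):
--     if not rows:
--         return None
--     normalized = (normalized_profile_url or "").strip().lower().rstrip("/")
--     last_profile_match = None
--     last_run_match = None
--     for row in rows:
--         if (row.get("Run ID") or "").strip() == run_id:
--             last_run_match = row
--             if normalized:
--                 rp = (row.get("Normalized Profile URL") or "").strip().lower().rstrip("/")
--                 if rp and rp == normalized:
--                     last_profile_match = row
--     if last_profile_match is not None: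
--         return last_profile_match
--     if last_run_match is not None:
--         return last_run_match
--     return rows[-1]
-- ===== Notes on version B (the rewrite author's own statement) =====
-- stated objective: alternative
-- what changed: Replaces A's two reversed scans (early-return on profile match, then a second reversed scan for a run_id-only match) with a single forward fold that overwrites two accumulators (last profile match, last run_id match) and picks between them after the loop.
import Mathlib
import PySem

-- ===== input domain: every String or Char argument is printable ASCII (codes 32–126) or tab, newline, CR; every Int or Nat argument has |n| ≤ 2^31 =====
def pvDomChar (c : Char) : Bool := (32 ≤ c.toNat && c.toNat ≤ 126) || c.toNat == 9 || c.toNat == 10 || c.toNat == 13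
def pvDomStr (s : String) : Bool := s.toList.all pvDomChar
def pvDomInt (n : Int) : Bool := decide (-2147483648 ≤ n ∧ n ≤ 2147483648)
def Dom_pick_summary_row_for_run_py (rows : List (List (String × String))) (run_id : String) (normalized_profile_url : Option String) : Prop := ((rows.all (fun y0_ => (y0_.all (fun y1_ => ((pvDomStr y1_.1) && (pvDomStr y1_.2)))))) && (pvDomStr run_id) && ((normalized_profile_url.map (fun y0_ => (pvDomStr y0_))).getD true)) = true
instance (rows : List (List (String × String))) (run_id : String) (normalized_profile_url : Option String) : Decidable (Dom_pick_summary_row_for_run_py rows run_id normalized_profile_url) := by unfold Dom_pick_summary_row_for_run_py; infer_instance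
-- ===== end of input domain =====

-- B replaces A's two reversed scans with one forward fold keeping the last profile match
-- and the last run_id match as accumulators (alternative decomposition, same O(n) cost).


-- shared helpers (the same Python expressions appear verbatim in A and B):
-- row.get(k) or "" on the association-list encoding of the dict (first match, "" if absent)
def pvDget (row : List (String × String)) (k : String) : String :=
  ((row.find? (fun p => p.1 == k)).map Prod.snd).getD ""

-- s.strip().lower().rstrip("/"); the trailing .rstrip("/") is ported by hand
-- (drop trailing '/' characters) and is exact
def pvNorm (s : String) : String :=
  String.ofList (((PySem.Str.lower (PySem.Str.strip s)).toList.reverse.dropWhile (fun c => c == '/')).reverse)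

-- ===== PORT A =====
-- first reversed loop: skip rows whose stripped "Run ID" differs, return on a profile match
def pvA_scan1 (run_id normalized : String) : List (List (String × String)) → Option (List (String × String))
  | [] => none
  | r :: rest =>
    if PySem.Str.strip (pvDget r "Run ID") ≠ run_id then pvA_scan1 run_id normalized rest
    else if normalized ≠ "" ∧ pvNorm (pvDget r "Normalized Profile URL") ≠ "" ∧
            normalized = pvNorm (pvDget r "Normalized Profile URL") then some r
    else pvA_scan1 run_id normalized rest

-- second reversed loop: first row whose stripped "Run ID" equals run_id
def pvA_scan2 (run_id : String) : List (List (String × String)) → Option (List (String × String))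
  | [] => none
  | r :: rest =>
    if PySem.Str.strip (pvDget r "Run ID") = run_id then some r else pvA_scan2 run_id rest

def pick_summary_row_for_run_py (rows : List (List (String × String))) (run_id : String) (normalized_profile_url : Option String) : Option (List (String × String)) :=
  if rows = [] then none
  else
    let normalized := pvNorm (normalized_profile_url.getD "")
    match pvA_scan1 run_id normalized rows.reverse with
    | some r => some r
    | none =>
      match pvA_scan2 run_id rows.reverse with
      | some r => some r
      | none => PySem.List.pyGet? rows (-1)

-- ===== PORT B =====
-- one forward step of the loop: overwrite last_run_match, and last_profile_match on a profile hit
def pvB_step (run_id normalized : String)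
    (st : Option (List (String × String)) × Option (List (String × String)))
    (row : List (String × String)) :
    Option (List (String × String)) × Option (List (String × String)) :=
  if PySem.Str.strip (pvDget row "Run ID") = run_id then
    if normalized ≠ "" ∧ pvNorm (pvDget row "Normalized Profile URL") ≠ "" ∧
        pvNorm (pvDget row "Normalized Profile URL") = normalized
    then (some row, some row) else (st.1, some row)
  else st

def pick_summary_row_for_run_py_alt (rows : List (List (String × String))) (run_id : String) (normalized_profile_url : Option String) : Option (List (String × String)) :=
  if rows = [] then none
  else
    let normalized := pvNorm (normalized_profile_url.getD "")
    let st := rows.foldl (pvB_step run_id normalized) (none, none)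
    match st.1 with
    | some r => some r
    | none =>
      match st.2 with
      | some r => some r
      | none => PySem.List.pyGet? rows (-1)

-- ===== PRECONDITION & SPEC =====
def Spec_pick_summary_row_for_run_py (rows : List (List (String × String))) (run_id : String) (normalized_profile_url : Option String) (out : Option (List (String × String))) : Prop := out = pick_summary_row_for_run_py_alt rows run_id normalized_profile_url
instance (rows : List (List (String × String))) (run_id : String) (normalized_profile_url : Option String) (out : Option (List (String × String))) : Decidable (Spec_pick_summary_row_for_run_py rows run_id normalized_profile_url out) := by unfold Spec_pick_summary_row_for_run_py; infer_instance

-- ===== CLAIM (what is proved, stated in full; the proofs are below) =====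
def Claim_equal_pick_summary_row_for_run_py : Prop := ∀ (rows : List (List (String × String))) (run_id : String) (normalized_profile_url : Option String), Dom_pick_summary_row_for_run_py rows run_id normalized_profile_url → Spec_pick_summary_row_for_run_py rows run_id normalized_profile_url (pick_summary_row_for_run_py rows run_id normalized_profile_url)

-- ===== LEMMAS AND PROOFS =====

-- "a orelse b" on options, used to phrase the accumulators in terms of A's scans
def pvPo {α : Type} (a b : Option α) : Option α :=
  match a with
  | some r => some r
  | none => b

theorem pvPo_assoc {α : Type} (a b c : Option α) : pvPo (pvPo a b) c = pvPo a (pvPo b c) := by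
  cases a <;> simp [pvPo]

theorem pvPo_none {α : Type} (a : Option α) : pvPo a none = a := by
  cases a <;> simp [pvPo]

theorem pvA_scan1_append (run_id normalized : String) (a b : List (List (String × String))) :
    pvA_scan1 run_id normalized (a ++ b) =
      pvPo (pvA_scan1 run_id normalized a) (pvA_scan1 run_id normalized b) := by
  induction a with
  | nil => simp [pvA_scan1, pvPo]
  | cons r rest ih =>
    simp only [List.cons_append, pvA_scan1]
    split_ifs with h1 h2 <;> simp [pvPo, ih]

theorem pvA_scan2_append (run_id : String) (a b : List (List (String × String))) :
    pvA_scan2 run_id (a ++ b) = pvPo (pvA_scan2 run_id a) (pvA_scan2 run_id b) := by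
  induction a with
  | nil => simp [pvA_scan2, pvPo]
  | cons r rest ih =>
    simp only [List.cons_append, pvA_scan2]
    split_ifs with h1 <;> simp [pvPo, ih]

theorem pvB_step_fst (run_id normalized : String)
    (st : Option (List (String × String)) × Option (List (String × String)))
    (row : List (String × String)) :
    (pvB_step run_id normalized st row).1 = pvPo (pvA_scan1 run_id normalized [row]) st.1 := by
  simp only [pvB_step, pvA_scan1]
  by_cases h1 : PySem.Str.strip (pvDget row "Run ID") = run_id
  · rw [if_pos h1, if_neg (not_not_intro h1)]
    by_cases h2 : normalized ≠ "" ∧ pvNorm (pvDget row "Normalized Profile URL") ≠ "" ∧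
        pvNorm (pvDget row "Normalized Profile URL") = normalized
    · rw [if_pos h2, if_pos (⟨h2.1, h2.2.1, h2.2.2.symm⟩ : normalized ≠ "" ∧
        pvNorm (pvDget row "Normalized Profile URL") ≠ "" ∧
        normalized = pvNorm (pvDget row "Normalized Profile URL"))]
      rfl
    · have h2' : ¬ (normalized ≠ "" ∧ pvNorm (pvDget row "Normalized Profile URL") ≠ "" ∧
          normalized = pvNorm (pvDget row "Normalized Profile URL")) :=
        fun hc => h2 ⟨hc.1, hc.2.1, hc.2.2.symm⟩
      rw [if_neg h2, if_neg h2']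
      simp [pvPo]
  · rw [if_neg h1, if_pos h1]
    simp [pvPo]

theorem pvB_step_snd (run_id normalized : String)
    (st : Option (List (String × String)) × Option (List (String × String)))
    (row : List (String × String)) :
    (pvB_step run_id normalized st row).2 = pvPo (pvA_scan2 run_id [row]) st.2 := by
  unfold pvB_step pvA_scan2
  by_cases h1 : PySem.Str.strip (pvDget row "Run ID") = run_id
  · by_cases h2 : normalized ≠ "" ∧ pvNorm (pvDget row "Normalized Profile URL") ≠ "" ∧
        pvNorm (pvDget row "Normalized Profile URL") = normalized
    <;> simp [h1, h2, pvPo]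
  · simp [h1, pvA_scan2, pvPo]

-- the forward fold computes exactly A's reversed scans
theorem pvB_fold_eq (run_id normalized : String) (l : List (List (String × String)))
    (st : Option (List (String × String)) × Option (List (String × String))) :
    (l.foldl (pvB_step run_id normalized) st).1
        = pvPo (pvA_scan1 run_id normalized l.reverse) st.1
    ∧ (l.foldl (pvB_step run_id normalized) st).2
        = pvPo (pvA_scan2 run_id l.reverse) st.2 := by
  induction l generalizing st with
  | nil => simp [pvA_scan1, pvA_scan2, pvPo]
  | cons row rest ih =>
    have h := ih (pvB_step run_id normalized st row)
    constructor
    · rw [List.foldl_cons, h.1, pvB_step_fst, List.reverse_cons, pvA_scan1_append, pvPo_assoc]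
    · rw [List.foldl_cons, h.2, pvB_step_snd, List.reverse_cons, pvA_scan2_append, pvPo_assoc]

-- ===== VERDICT (by name: the statement is the Claim_ definition above) =====
theorem pick_summary_row_for_run_py_spec : Claim_equal_pick_summary_row_for_run_py := by
  intro rows run_id npu _
  unfold Spec_pick_summary_row_for_run_py pick_summary_row_for_run_py pick_summary_row_for_run_py_alt
  by_cases h : rows = []
  · simp [h]
  · simp only [h, if_false]
    have hf := pvB_fold_eq run_id (pvNorm (npu.getD "")) rows (none, none)
    rw [hf.1, hf.2, pvPo_none, pvPo_none]
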